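-- pv_equiv track=rewrite | github.com/Komal97/DS-Algortihms | 18. Dynamic Programming/Python/climb_stair_with_var_jumps.py | climbStairWithVarJumps
-- ===== SOURCE A (Python) =====
-- def climbStairWithVarJumps(arr, n):
--
--     dp = [0]*(n+1)
--     dp[n] = 1
--     for i in range(n-1, -1, -1):
--         for j in range(1, arr[i]+1):         # take jumps given at a position
--             if i+j < len(dp):
--                 dp[i] += dp[i+j]
--
--     return dp[0]
-- ===== SOURCE B (Python) =====
-- def climbStairWithVarJumps(arr, n):
--     # suffix sums of the dp table: sufs[p] = dp[i] + ... + dp[n] for the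
--     # (p)-th computed suffix; each dp[i] is a range sum obtained in O(1).
--     sufs = [0, 1]                 # S(n+1) = 0, S(n) = dp[n] = 1
--     for i in range(n - 1, -1, -1):
--         k = min(arr[i], n - i)
--         if k < 0:
--             k = 0
--         dp_i = sufs[-1] - sufs[-1 - k]   # dp[i+1] + ... + dp[i+k]
--         sufs.append(dp_i + sufs[-1])     # S(i) = dp[i] + S(i+1)
--     return sufs[-1] - sufs[-2]           # dp[0] = S(0) - S(1)
-- ===== Notes on version B (the rewrite author's own statement) =====
-- stated objective: faster
-- what changed: Replaces the inner loop that adds dp[i+j] for every allowed jump length by a running suffix-sum list, so each dp[i] is one O(1) subtraction of two suffix sums instead of an O(arr[i]) scan.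
import Mathlib
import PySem

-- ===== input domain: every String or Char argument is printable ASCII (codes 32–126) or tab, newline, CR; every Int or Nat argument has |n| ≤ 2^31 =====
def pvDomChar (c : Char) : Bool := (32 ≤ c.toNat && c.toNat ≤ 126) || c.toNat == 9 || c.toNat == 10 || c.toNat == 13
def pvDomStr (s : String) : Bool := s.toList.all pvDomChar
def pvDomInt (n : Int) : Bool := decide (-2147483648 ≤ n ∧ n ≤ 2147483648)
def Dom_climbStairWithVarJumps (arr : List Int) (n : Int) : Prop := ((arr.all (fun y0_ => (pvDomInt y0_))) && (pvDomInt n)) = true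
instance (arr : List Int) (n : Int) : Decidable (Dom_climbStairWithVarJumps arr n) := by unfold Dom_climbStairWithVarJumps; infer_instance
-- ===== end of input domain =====

-- B replaces A's inner jump loop by a running suffix-sum list (each dp[i] one subtraction); faster.


-- ===== PORT A =====
-- Literal port of A: dp list of n+1 zeros, dp[n] = 1, then for i = n-1..0 an inner
-- loop over j = 1..arr[i] adding dp[i+j] under the guard i+j < len(dp).
-- pvStepA is A's outer-loop body; reads dp[i], dp[i+j], arr[i] use getD/pyGetD
-- with indices that are nonnegative and in range under Pre_ (so getD is exact there).
def pvStepA (arr : List Int) (dp : List Int) (i : Int) : List Int :=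
  (PySem.List.pyRange 1 (PySem.List.pyGetD arr i 0 + 1) 1).foldl (fun dp j =>
    if i + j < (dp.length : Int) then
      dp.set i.toNat (dp.getD i.toNat 0 + dp.getD (i + j).toNat 0)
    else dp) dp

def climbStairWithVarJumps (arr : List Int) (n : Int) : Int :=
  let dp : List Int := List.replicate (n + 1).toNat 0
  let dp := PySem.List.pySetD dp n 1
  let dp := (PySem.List.pyRange (n - 1) (-1) (-1)).foldl (pvStepA arr) dp
  dp.getD 0 0

-- ===== PORT B =====
-- Literal port of B (Source B): sufs = [0,1]; for i = n-1..0: k = min(arr[i], n-i)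
-- clamped at 0, dp_i = sufs[-1] - sufs[-1-k], append dp_i + sufs[-1];
-- return sufs[-1] - sufs[-2].  pvStepB is B's loop body; the negative indices
-- are in range under Pre_, so pyGetD is exact there.
def pvStepB (arr : List Int) (n : Int) (sufs : List Int) (i : Int) : List Int :=
  let k := min (PySem.List.pyGetD arr i 0) (n - i)
  let k := if k < 0 then 0 else k
  let dpi := PySem.List.pyGetD sufs (-1) 0 - PySem.List.pyGetD sufs (-1 - k) 0
  sufs ++ [dpi + PySem.List.pyGetD sufs (-1) 0]

def climbStairWithVarJumps_alt (arr : List Int) (n : Int) : Int :=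
  let sufs : List Int := [0, 1]
  let sufs := (PySem.List.pyRange (n - 1) (-1) (-1)).foldl (pvStepB arr n) sufs
  PySem.List.pyGetD sufs (-1) 0 - PySem.List.pyGetD sufs (-2) 0

-- ===== PRECONDITION & SPEC =====
-- Pre_ excludes exactly the inputs where A raises IndexError: n < 0 (dp[n] out of
-- range) or n > len(arr) (arr[i] out of range in the loop).
def Pre_climbStairWithVarJumps (arr : List Int) (n : Int) : Prop :=
  0 ≤ n ∧ n ≤ (arr.length : Int)
instance (arr : List Int) (n : Int) : Decidable (Pre_climbStairWithVarJumps arr n) := by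
  unfold Pre_climbStairWithVarJumps; infer_instance
def pvWitness_climbStairWithVarJumps : List Int × Int := ([3, 1, 0, 2], 4)
def Spec_climbStairWithVarJumps (arr : List Int) (n : Int) (out : Int) : Prop := out = climbStairWithVarJumps_alt arr n
instance (arr : List Int) (n : Int) (out : Int) : Decidable (Spec_climbStairWithVarJumps arr n out) := by unfold Spec_climbStairWithVarJumps; infer_instance

-- ===== CLAIM (what is proved, stated in full; the proofs are below) =====
def Claim_equal_climbStairWithVarJumps : Prop := ∀ (arr : List Int) (n : Int), Dom_climbStairWithVarJumps arr n → Pre_climbStairWithVarJumps arr n → Spec_climbStairWithVarJumps arr n (climbStairWithVarJumps arr n)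

-- ===== LEMMAS AND PROOFS =====
-- The common mathematical description: the dp table built back to front,
-- pvTbl arr N m = [dp[N-m], dp[N-m+1], ..., dp[N]].
def pvTbl (arr : List Int) (N : Nat) : Nat → List Int
  | 0 => [1]
  | m + 1 =>
    let t := pvTbl arr N m
    let k := (min (arr.getD (N - (m + 1)) 0) ((m : Int) + 1)).toNat
    (t.take k).sum :: t

theorem pvTbl_length (arr : List Int) (N : Nat) : ∀ m, (pvTbl arr N m).length = m + 1
  | 0 => rfl
  | m + 1 => by simp [pvTbl, pvTbl_length arr N m]

theorem pv_sum_take_clamp (t : List Int) (a : Nat) :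
    (t.take a).sum = (t.take (min a t.length)).sum := by
  by_cases h : a ≤ t.length
  · rw [Nat.min_eq_left h]
  · rw [List.take_of_length_le (by omega), Nat.min_eq_right (by omega), List.take_length]

theorem pv_getD_set_self (l : List Int) (i : Nat) (v : Int) (h : i < l.length) :
    (l.set i v).getD i 0 = v := by
  rw [List.getD_eq_getElem _ _ (by simpa using h), List.getElem_set_self]

theorem pv_getD_set_ne (l : List Int) (i j : Nat) (v : Int) (hij : i ≠ j) :
    (l.set i v).getD j 0 = l.getD j 0 := by
  by_cases hj : j < l.length
  · rw [List.getD_eq_getElem _ _ (by simpa using hj), List.getD_eq_getElem _ _ hj,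
      List.getElem_set_ne hij]
  · rw [List.getD_eq_default _ _ (by simpa using not_lt.mp hj),
      List.getD_eq_default _ _ (not_lt.mp hj)]

-- A's inner loop computes one clipped range sum.
theorem pv_innerA (c : Nat) : ∀ (dp : List Int) (m : Nat), m < dp.length →
    (PySem.List.pyRange 1 ((c : Int) + 1) 1).foldl (fun dp j =>
      if ((m : Int)) + j < (dp.length : Int) then
        dp.set ((m : Int)).toNat (dp.getD ((m : Int)).toNat 0 + dp.getD (((m : Int)) + j).toNat 0)
      else dp) dp
    = dp.set m (dp.getD m 0 + ((dp.drop (m + 1)).take c).sum) := by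
  induction c with
  | zero =>
    intro dp m hm
    rw [PySem.List.pyRange_one_eq_nil (by norm_num)]
    simp only [List.foldl_nil, List.take_zero, List.sum_nil, add_zero]
    rw [List.getD_eq_getElem _ _ hm, List.set_getElem_self]
  | succ c ih =>
    intro dp m hm
    have hc : ((c + 1 : Nat) : Int) + 1 = ((c : Int) + 1) + 1 := by push_cast; ring
    rw [hc, PySem.List.pyRange_one_succ_right (by omega), List.foldl_append, ih dp m hm]
    simp only [List.foldl_cons, List.foldl_nil]
    have hlen' : (dp.set m (dp.getD m 0 + ((dp.drop (m + 1)).take c).sum)).length = dp.length := by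
      simp
    have hcast : ((m : Int)) + ((c : Int) + 1) = ((m + c + 1 : Nat) : Int) := by push_cast; ring
    by_cases hg : ((m : Int)) + ((c : Int) + 1)
        < ((dp.set m (dp.getD m 0 + ((dp.drop (m + 1)).take c).sum)).length : Int)
    · have hin : m + c + 1 < dp.length := by rw [hlen'] at hg; exact_mod_cast by omega
      rw [if_pos hg, hcast, Int.toNat_natCast, Int.toNat_natCast,
        pv_getD_set_self _ _ _ hm, pv_getD_set_ne _ _ _ _ (by omega), List.set_set]
      have hdlen : c < (dp.drop (m + 1)).length := by simp; omega
      have h3 : ((dp.drop (m + 1)).take (c + 1)).sum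
          = ((dp.drop (m + 1)).take c).sum + dp.getD (m + c + 1) 0 := by
        rw [List.take_add_one, List.sum_append, List.getElem?_eq_getElem hdlen,
          List.getD_eq_getElem _ _ hin]
        simp [List.getElem_drop]
        congr 1
        omega
      rw [h3]
      ring_nf
    · have hout : dp.length ≤ m + c + 1 := by
        rw [hlen'] at hg
        omega
      rw [if_neg hg]
      have hdlen : (dp.drop (m + 1)).length ≤ c := by simp; omega
      have h4 : (dp.drop (m + 1)).take (c + 1) = (dp.drop (m + 1)).take c := by
        rw [List.take_of_length_le (by omega), List.take_of_length_le hdlen]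
      rw [h4]

-- One outer-loop step of A turns one more leading 0 into the next table entry.
theorem pv_stepA_eq (arr : List Int) (N m : Nat) (hm : m + 1 ≤ N) :
    pvStepA arr (List.replicate (m + 1) 0 ++ pvTbl arr N (N - (m + 1))) ((m : Int))
    = List.replicate m 0 ++ pvTbl arr N (N - m) := by
  have hNm : N - m = (N - (m + 1)) + 1 := by omega
  have hidx : N - ((N - (m + 1)) + 1) = m := by omega
  have hlen0 : m < (List.replicate (m + 1) (0 : Int) ++ pvTbl arr N (N - (m + 1))).length := by
    simp
    omega
  have hget0 : (List.replicate (m + 1) (0 : Int) ++ pvTbl arr N (N - (m + 1))).getD m 0 = 0 := by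
    rw [List.getD_eq_getElem _ _ hlen0,
      List.getElem_append_left (by simp : m < (List.replicate (m + 1) (0 : Int)).length),
      List.getElem_replicate]
  have hdrop : (List.replicate (m + 1) (0 : Int) ++ pvTbl arr N (N - (m + 1))).drop (m + 1)
      = pvTbl arr N (N - (m + 1)) := by
    have h := List.drop_left (l₁ := List.replicate (m + 1) (0 : Int))
      (l₂ := pvTbl arr N (N - (m + 1)))
    rwa [List.length_replicate] at h
  have hset : ∀ v : Int,
      (List.replicate (m + 1) (0 : Int) ++ pvTbl arr N (N - (m + 1))).set m v
      = List.replicate m 0 ++ (v :: pvTbl arr N (N - (m + 1))) := by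
    intro v
    rw [List.replicate_succ', List.append_assoc, List.set_append]
    simp
  rw [hNm]
  simp only [pvTbl, hidx]
  unfold pvStepA
  rw [PySem.List.pyGetD_natCast]
  by_cases ha : arr.getD m 0 ≤ 0
  · rw [PySem.List.pyRange_one_eq_nil (by omega), List.foldl_nil]
    have hk : (min (arr.getD m 0) (((N - (m + 1) : Nat) : Int) + 1)).toNat = 0 := by omega
    rw [hk, List.take_zero, List.sum_nil, List.replicate_succ', List.append_assoc]
    rfl
  · have ha' : arr.getD m 0 = (((arr.getD m 0).toNat : Nat) : Int) := by omega
    rw [ha', pv_innerA _ _ _ hlen0, hget0, hdrop, hset, zero_add]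
    have hk : (min ((((arr.getD m 0).toNat : Nat)) : Int) (((N - (m + 1) : Nat) : Int) + 1)).toNat
        = min (arr.getD m 0).toNat ((N - (m + 1)) + 1) := by omega
    rw [hk, pv_sum_take_clamp (pvTbl arr N (N - (m + 1))) (arr.getD m 0).toNat,
      pvTbl_length]

theorem pv_outerA (arr : List Int) (N : Nat) :
    ∀ m, m ≤ N →
    (PySem.List.pyRange ((m : Int) - 1) (-1) (-1)).foldl (pvStepA arr)
      (List.replicate m 0 ++ pvTbl arr N (N - m)) = pvTbl arr N N := by
  intro m
  induction m with
  | zero => intro _; rw [PySem.List.pyRange_neg_one_eq_nil (by norm_num)]; simp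
  | succ m ih =>
    intro hm
    have hms : ((m + 1 : Nat) : Int) - 1 = (m : Int) := by push_cast; ring
    rw [hms, PySem.List.pyRange_neg_one_cons (by omega), List.foldl_cons]
    rw [pv_stepA_eq arr N m hm]
    exact ih (by omega)

theorem pv_A_eq_tbl (arr : List Int) (n : Int) (h0 : 0 ≤ n) :
    climbStairWithVarJumps arr n = (pvTbl arr n.toNat n.toNat).getD 0 0 := by
  lift n to Nat using h0 with N
  simp only [climbStairWithVarJumps, Int.toNat_natCast]
  rw [PySem.List.pySetD_natCast, show ((N : Int) + 1).toNat = N + 1 by omega]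
  have hinit : (List.replicate (N + 1) (0 : Int)).set N 1
      = List.replicate N 0 ++ pvTbl arr N (N - N) := by
    rw [Nat.sub_self, List.replicate_succ', List.set_append]
    simp [pvTbl]
  rw [hinit, pv_outerA arr N N (le_refl _)]

-- ===== B-side: suffix-sum list of a table =====
def pvSufOf (t : List Int) : List Int := (t.tails.map List.sum).reverse

theorem pvSufOf_length (t : List Int) : (pvSufOf t).length = t.length + 1 := by
  simp [pvSufOf]

theorem pvSufOf_cons (v : Int) (t : List Int) :
    pvSufOf (v :: t) = pvSufOf t ++ [v + t.sum] := by
  simp [pvSufOf]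

-- sufs[-1-k] is the sum of the last k table entries.
theorem pvSufOf_get (t : List Int) (k : Nat) (hk : k ≤ t.length) :
    PySem.List.pyGetD (pvSufOf t) (-(1 + (k : Int))) 0 = (t.drop k).sum := by
  have h1 : -(1 + (k : Int)) = -(((k + 1 : Nat) : Int)) := by push_cast; ring
  rw [h1, PySem.List.pyGetD_neg_natCast _ _ _ (by omega) (by rw [pvSufOf_length]; omega)]
  simp only [pvSufOf, List.getElem_reverse, List.getElem_map, List.getElem_tails,
    List.length_reverse, List.length_map, List.length_tails]
  have hix : t.length + 1 - 1 - (t.length + 1 - (k + 1)) = k := by omega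
  rw [hix]

-- One outer-loop step of B appends the next suffix sum.
theorem pv_stepB_eq (arr : List Int) (N m : Nat) (hm : m + 1 ≤ N) :
    pvStepB arr (N : Int) (pvSufOf (pvTbl arr N (N - (m + 1)))) ((m : Int))
    = pvSufOf (pvTbl arr N (N - m)) := by
  have hNm : N - m = (N - (m + 1)) + 1 := by omega
  have hidx : N - ((N - (m + 1)) + 1) = m := by omega
  have htlen : (pvTbl arr N (N - (m + 1))).length = N - m := by
    rw [pvTbl_length]; omega
  have hbound : ((N - (m + 1) : Nat) : Int) + 1 = (N : Int) - (m : Int) := by omega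
  have hm1 : (-1 : Int) = -(1 + ((0 : Nat) : Int)) := by norm_num
  rw [hNm]
  simp only [pvTbl, hidx, pvSufOf_cons]
  unfold pvStepB
  simp only [PySem.List.pyGetD_natCast]
  by_cases hneg : min (arr.getD m 0) ((N : Int) - (m : Int)) < 0
  · simp only [if_pos hneg]
    rw [sub_zero, hm1, pvSufOf_get _ 0 (by omega), List.drop_zero, sub_self,
      show (min (arr.getD m 0) (((N - (m + 1) : Nat) : Int) + 1)).toNat = 0 by
        rw [hbound]; omega,
      List.take_zero, List.sum_nil, zero_add]
  · simp only [if_neg hneg]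
    have hk0 : 0 ≤ min (arr.getD m 0) ((N : Int) - (m : Int)) := by omega
    have hkle : (min (arr.getD m 0) ((N : Int) - (m : Int))).toNat
        ≤ (pvTbl arr N (N - (m + 1))).length := by rw [htlen]; omega
    have hneg1 : -1 - min (arr.getD m 0) ((N : Int) - (m : Int))
        = -(1 + (((min (arr.getD m 0) ((N : Int) - (m : Int))).toNat : Nat) : Int)) := by
      omega
    rw [hneg1, pvSufOf_get _ _ hkle, hm1, pvSufOf_get _ 0 (by omega), List.drop_zero,
      show (min (arr.getD m 0) (((N - (m + 1) : Nat) : Int) + 1)).toNat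
          = (min (arr.getD m 0) ((N : Int) - (m : Int))).toNat by rw [hbound]]
    have hsum := List.sum_take_add_sum_drop (pvTbl arr N (N - (m + 1)))
      (min (arr.getD m 0) ((N : Int) - (m : Int))).toNat
    congr 2
    omega

theorem pv_outerB (arr : List Int) (N : Nat) :
    ∀ m, m ≤ N →
    (PySem.List.pyRange ((m : Int) - 1) (-1) (-1)).foldl (pvStepB arr (N : Int))
      (pvSufOf (pvTbl arr N (N - m))) = pvSufOf (pvTbl arr N N) := by
  intro m
  induction m with
  | zero => intro _; rw [PySem.List.pyRange_neg_one_eq_nil (by norm_num)]; simp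
  | succ m ih =>
    intro hm
    have hms : ((m + 1 : Nat) : Int) - 1 = (m : Int) := by push_cast; ring
    rw [hms, PySem.List.pyRange_neg_one_cons (by omega), List.foldl_cons,
      pv_stepB_eq arr N m hm]
    exact ih (by omega)

theorem pv_B_eq_tbl (arr : List Int) (n : Int) (h0 : 0 ≤ n) :
    climbStairWithVarJumps_alt arr n = (pvTbl arr n.toNat n.toNat).getD 0 0 := by
  lift n to Nat using h0 with N
  simp only [climbStairWithVarJumps_alt, Int.toNat_natCast]
  have hinit : ([0, 1] : List Int) = pvSufOf (pvTbl arr N (N - N)) := by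
    rw [Nat.sub_self]; rfl
  rw [hinit, pv_outerB arr N N (le_refl _)]
  have hTlen : (pvTbl arr N N).length = N + 1 := pvTbl_length arr N N
  obtain ⟨x, xs, hT⟩ : ∃ x xs, pvTbl arr N N = x :: xs := by
    cases hE : pvTbl arr N N with
    | nil => rw [hE] at hTlen; simp at hTlen
    | cons x xs => exact ⟨x, xs, rfl⟩
  have hm1 : (-1 : Int) = -(1 + ((0 : Nat) : Int)) := by norm_num
  have hm2 : (-2 : Int) = -(1 + ((1 : Nat) : Int)) := by norm_num
  rw [hm1, pvSufOf_get _ 0 (by omega), List.drop_zero, hm2,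
    pvSufOf_get _ 1 (by omega), hT]
  simp

-- ===== VERDICT (by name: the statement is the Claim_ definition above) =====
theorem climbStairWithVarJumps_spec : Claim_equal_climbStairWithVarJumps := by
  intro arr n _ hpre
  unfold Spec_climbStairWithVarJumps
  rw [pv_A_eq_tbl arr n hpre.1, pv_B_eq_tbl arr n hpre.1]
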